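-- pv_equiv track=rewrite | github.com/ZykeDev/NovelExons | scripts/detectEvents.py | getPrecIntrons
-- ===== SOURCE A (Python) =====
-- import sys, os, itertools, operator
--
-- def getPrecIntrons(Introns, I):
--     Introns.sort(key=operator.itemgetter(1))
--     i = Introns.index(I)
--
--     Prec = set()
--     if i>0:
--         found = False
--         while not found and i>0:
--             i-=1
--             (s,e) = Introns[i]
--             if e<I[0]:
--                 found = True
--                 Prec.add((s, e))
--
--         flag = True
--         while flag and i>0:
--             i-=1
--             (s_,e_) = Introns[i]
--             if s<=e_<=e:
--                 Prec.add((s_, e_))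
--             else:
--                 flag = False
--     return list(Prec)
-- ===== SOURCE B (Python) =====
-- import operator, bisect
--
-- def getPrecIntrons(Introns, I):
--     # NOTE: like A, sorts Introns in place (same observable mutation).
--     Introns.sort(key=operator.itemgetter(1))
--     i = Introns.index(I)
--     ends = [e for (_, e) in Introns]
--     f = min(bisect.bisect_left(ends, I[0]), i) - 1
--     if f < 0:
--         return []
--     (s, e) = Introns[f]
--     low = bisect.bisect_left(ends, s)
--     Prec = {(s, e)}
--     Prec.update(reversed(Introns[low:f]))
--     return list(Prec)
-- ===== Notes on version B (the rewrite author's own statement) =====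
-- stated objective: alternative
-- what changed: Replaces both backward while-loops by two bisect binary searches over the monotone end coordinates and one contiguous slice: f is the largest index < i with end < I[0] and low the first index with end >= Introns[f][0], so Prec = {Introns[f]} plus the slice Introns[low:f].
import Mathlib
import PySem

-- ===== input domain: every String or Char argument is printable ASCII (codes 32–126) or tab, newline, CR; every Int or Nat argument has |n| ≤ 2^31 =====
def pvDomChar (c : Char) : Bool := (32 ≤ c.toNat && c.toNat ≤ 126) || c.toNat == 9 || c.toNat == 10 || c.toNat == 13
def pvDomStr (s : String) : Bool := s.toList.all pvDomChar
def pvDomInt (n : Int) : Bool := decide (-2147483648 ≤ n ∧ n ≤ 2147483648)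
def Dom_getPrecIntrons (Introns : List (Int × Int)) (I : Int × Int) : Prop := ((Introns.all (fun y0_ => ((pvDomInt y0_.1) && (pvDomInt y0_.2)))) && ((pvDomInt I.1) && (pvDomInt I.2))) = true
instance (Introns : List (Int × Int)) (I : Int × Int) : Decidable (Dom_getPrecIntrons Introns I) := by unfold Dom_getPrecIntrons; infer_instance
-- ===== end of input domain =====

-- B replaces A's two backward while-loops by bisect binary searches over the monotone
-- end coordinates plus one contiguous slice (objective: alternative decomposition; both
-- versions sort the argument list in place in Python — the theorems are about the return value).

-- ===== PORT A =====
-- first while-loop: scan indices i-1, i-2, … for the first intron with end < x;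
-- returns the index where it was found (loop indices are always < L.length, so getD is exact).
def pvLoopA1 (L : List (Int × Int)) (x : Int) : Nat → Option Nat
  | 0 => none
  | i + 1 =>
    if (L.getD i (0, 0)).2 < x then some i else pvLoopA1 L x i

-- second while-loop: from index i-1 downwards, add introns while s ≤ e_ ≤ e, stop at the first failure.
def pvLoopA2 (L : List (Int × Int)) (s e : Int) (P : PySem.Set (Int × Int)) : Nat → PySem.Set (Int × Int)
  | 0 => P
  | i + 1 =>
    let p := L.getD i (0, 0)
    if s ≤ p.2 ∧ p.2 ≤ e then pvLoopA2 L s e (PySem.Set.add P p) i else P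

def getPrecIntrons (Introns : List (Int × Int)) (I : Int × Int) : List (Int × Int) :=
  let L := PySem.List.sorted Introns (fun p => p.2)
  match PySem.List.index? L I with
  | none => []          -- Python raises ValueError here; excluded by Pre_
  | some i =>
    if 0 < i then
      match pvLoopA1 L I.1 i with
      | none => []      -- found stayed False: i reached 0, Prec is empty
      | some f =>
        let p := L.getD f (0, 0)
        pvLoopA2 L p.1 p.2 (PySem.Set.add PySem.Set.empty p) f
    else []

-- ===== PORT B =====
def getPrecIntrons_alt (Introns : List (Int × Int)) (I : Int × Int) : List (Int × Int) :=
  let L := PySem.List.sorted Introns (fun p => p.2)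
  match PySem.List.index? L I with
  | none => []          -- Python raises ValueError here; excluded by Pre_
  | some i =>
    let ends := L.map (fun p => p.2)
    let f : Int := ((min (PySem.List.bisectLeft ends I.1) i : Nat) : Int) - 1
    if f < 0 then []
    else
      let p := L.getD f.toNat (0, 0)
      let low := PySem.List.bisectLeft ends p.1
      PySem.Set.update (PySem.Set.add PySem.Set.empty p)
        ((PySem.List.slice L (some (low : Int)) (some f)).reverse)

-- ===== PRECONDITION & SPEC =====
-- Pre_ excludes exactly the inputs where Introns.index(I) raises ValueError.
def Pre_getPrecIntrons (Introns : List (Int × Int)) (I : Int × Int) : Prop := I ∈ Introns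
instance (Introns : List (Int × Int)) (I : Int × Int) : Decidable (Pre_getPrecIntrons Introns I) := by unfold Pre_getPrecIntrons; infer_instance
def pvWitness_getPrecIntrons : (List (Int × Int)) × (Int × Int) := ([(1, 2), (4, 9), (6, 12)], (6, 12))

def Spec_getPrecIntrons (Introns : List (Int × Int)) (I : Int × Int) (out : List (Int × Int)) : Prop := out = getPrecIntrons_alt Introns I
instance (Introns : List (Int × Int)) (I : Int × Int) (out : List (Int × Int)) : Decidable (Spec_getPrecIntrons Introns I out) := by unfold Spec_getPrecIntrons; infer_instance

-- ===== CLAIM (what is proved, stated in full; the proofs are below) =====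
def Claim_equal_getPrecIntrons : Prop := ∀ (Introns : List (Int × Int)) (I : Int × Int), Dom_getPrecIntrons Introns I → Pre_getPrecIntrons Introns I → Spec_getPrecIntrons Introns I (getPrecIntrons Introns I)

-- ===== LEMMAS AND PROOFS =====

-- A's first loop, characterised by the bisect index c: starting the backward scan at fuel i,
-- it finds index (min c i) - 1, or nothing when min c i = 0.
theorem pvLoopA1_eq (L : List (Int × Int)) (x : Int) (c : Nat)
    (Hc : ∀ j, j < L.length → ((L.getD j (0, 0)).2 < x ↔ j < c)) :
    ∀ i, i ≤ L.length →
      pvLoopA1 L x i = if min c i = 0 then none else some (min c i - 1) := by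
  intro i
  induction i with
  | zero => intro _; simp [pvLoopA1]
  | succ i ih =>
    intro hi
    rw [pvLoopA1]
    by_cases h : i < c
    · rw [if_pos ((Hc i (by omega)).mpr h)]
      have : min c (i + 1) = i + 1 := by omega
      simp [this]
    · rw [if_neg (by simpa using (Hc i (by omega)).not.mpr (by omega))]
      rw [ih (by omega)]
      have : min c (i + 1) = min c i := by omega
      rw [this]

-- A's second loop, characterised by the bisect index low: starting at fuel j ≤ f,
-- it adds exactly the introns at indices j-1 down to low, i.e. the reversed slice L[low:j].
theorem pvLoopA2_eq (L : List (Int × Int)) (s e : Int) (low : Nat)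
    (Hlow : ∀ k, k < L.length → (s ≤ (L.getD k (0, 0)).2 ↔ low ≤ k))
    (f : Nat) (hf : f < L.length)
    (He : ∀ k, k < f → (L.getD k (0, 0)).2 ≤ e) :
    ∀ j, j ≤ f → ∀ P, pvLoopA2 L s e P j = PySem.Set.update P (((L.take j).drop low).reverse) := by
  intro j
  induction j with
  | zero => intro _ P; simp [pvLoopA2, PySem.Set.update]
  | succ j ih =>
    intro hj P
    have hjlen : j < L.length := by omega
    rw [pvLoopA2]
    by_cases h : low ≤ j
    · rw [if_pos ⟨(Hlow j hjlen).mpr h, He j (by omega)⟩]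
      rw [ih (by omega)]
      have htake : L.take (j + 1) = L.take j ++ [L.getD j (0, 0)] := by
        rw [List.getD_eq_getElem L (0,0) hjlen, List.take_add_one, List.getElem?_eq_getElem hjlen]
        rfl
      rw [htake, List.drop_append_of_le_length (by rw [List.length_take]; omega), List.reverse_append]
      simp [PySem.Set.update]
    · rw [if_neg (by
        intro hcon
        exact absurd ((Hlow j hjlen).mp hcon.1) (by omega))]
      have : ((L.take (j + 1)).drop low) = [] := by
        apply List.drop_eq_nil_of_le
        simp
        omega
      simp [this, PySem.Set.update]

theorem getPrecIntrons_spec_aux : ∀ (Introns : List (Int × Int)) (I : Int × Int),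
    Pre_getPrecIntrons Introns I → getPrecIntrons Introns I = getPrecIntrons_alt Introns I := by
  intro Introns I hpre
  unfold getPrecIntrons getPrecIntrons_alt
  set L := PySem.List.sorted Introns (fun p => p.2) with hL
  have hmem : I ∈ L := by
    rw [hL, PySem.List.mem_sorted]; exact hpre
  obtain ⟨i, hi⟩ := Option.isSome_iff_exists.mp ((PySem.List.index?_isSome_iff L I).mpr hmem)
  simp only [hi]
  obtain ⟨hilen, hLi, -⟩ := PySem.List.getElem_of_index?_eq_some hi
  set ends := L.map (fun p => p.2) with hends
  have hendslen : ends.length = L.length := by simp [hends]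
  have hpw : ends.Pairwise (· ≤ ·) := by
    rw [hends, hL]; exact PySem.List.sorted_map_key_pairwise Introns (fun p => p.2)
  have hend_getD : ∀ j (hj : j < L.length), (L.getD j (0, 0)).2 = ends[j]'(by omega) := by
    intro j hj
    rw [List.getD_eq_getElem L (0,0) hj]
    simp [hends]
  -- characterisation of the two bisect indices
  set c := PySem.List.bisectLeft ends I.1 with hc
  obtain ⟨hc_le, hc_lt, hc_ge⟩ := PySem.List.bisectLeft_spec ends I.1 hpw
  have Hc : ∀ j, j < L.length → ((L.getD j (0, 0)).2 < I.1 ↔ j < c) := by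
    intro j hj
    rw [hend_getD j hj]
    constructor
    · intro h; by_contra hcj
      exact absurd h (not_lt.mpr (hc_ge j (by omega) (by omega)))
    · intro h; exact hc_lt j (by omega) h
  rcases Nat.eq_zero_or_pos (min c i) with hm | hm
  · -- nothing found: both return []
    have hf : ((min c i : Nat) : Int) - 1 < 0 := by
      rw [hm]; norm_num
    rw [if_pos hf]
    rcases Nat.eq_zero_or_pos i with hi0 | hi0
    · simp [hi0]
    · rw [if_pos hi0]
      have hc0 : c = 0 := by omega
      rw [pvLoopA1_eq L I.1 c Hc i (by omega)]
      simp [hm]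
  · -- found at index m - 1
    set m := min c i with hmdef
    have hipos : 0 < i := by omega
    rw [if_pos hipos, pvLoopA1_eq L I.1 c Hc i (by omega), if_neg (by omega)]
    have hfnn : ¬ ((m : Nat) : Int) - 1 < 0 := by omega
    rw [if_neg hfnn]
    have htoNat : (((m : Nat) : Int) - 1).toNat = m - 1 := by omega
    rw [htoNat]
    have hflen : m - 1 < L.length := by omega
    set p := L.getD (m - 1) (0, 0) with hp
    set low := PySem.List.bisectLeft ends p.1 with hlow
    obtain ⟨hl_le, hl_lt, hl_ge⟩ := PySem.List.bisectLeft_spec ends p.1 hpw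
    have Hlow : ∀ k, k < L.length → (p.1 ≤ (L.getD k (0, 0)).2 ↔ low ≤ k) := by
      intro k hk
      rw [hend_getD k hk]
      constructor
      · intro h; by_contra hlk
        exact absurd (hl_lt k (by omega) (by omega)) (not_lt.mpr h)
      · intro h; exact hl_ge k (by omega) h
    have He : ∀ k, k < m - 1 → (L.getD k (0, 0)).2 ≤ p.2 := by
      intro k hk
      rw [List.getD_eq_getElem L (0,0) (by omega : k < L.length), hp, List.getD_eq_getElem L (0,0) hflen]
      exact PySem.List.key_sorted_getElem_mono Introns (fun p => p.2) (by omega) hflen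
    show pvLoopA2 L p.1 p.2 (PySem.Set.add PySem.Set.empty p) (m - 1) =
      (PySem.Set.add PySem.Set.empty p).update
        (PySem.List.slice L (some (low : Int)) (some ((m : Int) - 1))).reverse
    rw [pvLoopA2_eq L p.1 p.2 low Hlow (m - 1) hflen He (m - 1) le_rfl]
    -- the slice in B equals the take/drop form in the loop characterisation
    have hslice : PySem.List.slice L (some (low : Int)) (some (((m : Nat) : Int) - 1)) = (L.take (m - 1)).drop low := by
      have : (((m : Nat) : Int) - 1) = (((m - 1 : Nat) : Int)) := by omega
      rw [this, PySem.List.slice_natCast, List.drop_take]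
    rw [hslice]

-- ===== VERDICT (by name: the statement is the Claim_ definition above) =====
theorem getPrecIntrons_spec : Claim_equal_getPrecIntrons := by
  intro Introns I _ hpre
  exact getPrecIntrons_spec_aux Introns I hpre
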